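-- pv_equiv track=rewrite | github.com/StrategyLogic/omen | src/omen/ui/causal_trace.py | _choose_target_node_id
-- ===== SOURCE A (Python) =====
-- from typing import Any
--
-- def _choose_target_node_id(
--     gap: dict[str, Any],
--     branch_points: list[dict[str, Any]],
--     graph_nodes: list[dict[str, Any]],
--     fallback_index: int,
-- ) -> str:
--     factor = str(gap.get("factor") or "").strip()
--     preferred_types = {
--         "simulated_vs_real_outcome": ["winner_emergence", "competition_activation"],
--         "adoption_resistance": ["competition_activation", "user_overlap"],
--         "pilot_success_to_scale": ["winner_emergence", "competition_activation"],
--     }.get(factor, [])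
--
--     for preferred_type in preferred_types:
--         for point in branch_points:
--             if point.get("type") == preferred_type and point.get("step") is not None:
--                 return f"step-{point.get('step')}"
--
--     if factor == "simulated_vs_real_outcome" and graph_nodes:
--         return str(graph_nodes[-1].get("id") or "step-0")
--
--     for point in branch_points:
--         if point.get("step") is not None:
--             return f"step-{point.get('step')}"
--
--     if graph_nodes:
--         return str(graph_nodes[min(fallback_index, len(graph_nodes) - 1)].get("id") or "step-0")
--     return "step-0"
-- ===== SOURCE B (Python) =====
-- def _node_id_at(graph_nodes, index):
--     return str(graph_nodes[index].get("id") or "step-0")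
--
--
-- def _choose_target_node_id(gap, branch_points, graph_nodes, fallback_index):
--     factor = str(gap.get("factor") or "").strip()
--     preferred = {
--         "simulated_vs_real_outcome": ["winner_emergence", "competition_activation"],
--         "adoption_resistance": ["competition_activation", "user_overlap"],
--         "pilot_success_to_scale": ["winner_emergence", "competition_activation"],
--     }.get(factor, [])
--     rank = {t: i for i, t in enumerate(preferred)}
--
--     # one pass: keep the candidate minimal under (rank, position), plus the
--     # first step-bearing node id for the late fallback
--     best = None          # (rank, position, node_id)
--     first_any = None
--     for pos, point in enumerate(branch_points):
--         step = point.get("step")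
--         if step is None:
--             continue
--         node_id = f"step-{step}"
--         if first_any is None:
--             first_any = node_id
--         r = rank.get(point.get("type"))
--         if r is not None and (best is None or (r, pos) < best[:2]):
--             best = (r, pos, node_id)
--     if best is not None:
--         return best[2]
--
--     if factor == "simulated_vs_real_outcome" and graph_nodes:
--         return _node_id_at(graph_nodes, -1)
--     if first_any is not None:
--         return first_any
--     if graph_nodes:
--         return _node_id_at(graph_nodes, min(fallback_index, len(graph_nodes) - 1))
--     return "step-0"
-- ===== Notes on version B (the rewrite author's own statement) =====
-- stated objective: alternative
-- what changed: Replaces the nested preferred_type x branch_points scans with a single pass over enumerate(branch_points) that keeps the candidate minimal under the lexicographic key (priority rank, position) -- a selection-by-minimum-key algorithm with a rank dict built from the factor table -- plus the first step-bearing id for the late fallback; the two graph_nodes fallbacks are unified into one helper.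
import Mathlib
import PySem

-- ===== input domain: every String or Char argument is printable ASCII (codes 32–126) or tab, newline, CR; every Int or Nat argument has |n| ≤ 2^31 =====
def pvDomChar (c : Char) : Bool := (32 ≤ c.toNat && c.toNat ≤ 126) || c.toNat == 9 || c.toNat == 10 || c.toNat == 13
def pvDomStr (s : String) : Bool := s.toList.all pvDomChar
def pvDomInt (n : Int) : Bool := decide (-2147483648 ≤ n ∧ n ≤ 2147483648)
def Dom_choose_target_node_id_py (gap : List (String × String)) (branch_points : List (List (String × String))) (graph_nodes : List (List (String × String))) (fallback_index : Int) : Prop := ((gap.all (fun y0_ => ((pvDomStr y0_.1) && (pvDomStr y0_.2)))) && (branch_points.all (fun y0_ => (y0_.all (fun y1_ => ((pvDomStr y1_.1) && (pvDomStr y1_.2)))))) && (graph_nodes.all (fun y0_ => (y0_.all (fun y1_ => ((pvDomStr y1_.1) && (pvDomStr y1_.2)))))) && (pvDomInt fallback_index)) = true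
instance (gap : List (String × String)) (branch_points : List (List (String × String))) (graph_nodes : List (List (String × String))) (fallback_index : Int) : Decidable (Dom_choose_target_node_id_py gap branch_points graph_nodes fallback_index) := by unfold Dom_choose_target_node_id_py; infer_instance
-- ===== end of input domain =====

-- B replaces the nested preferred_type × branch_points scans with a single pass over
-- enumerated branch_points keeping the candidate minimal under (priority rank, position);
-- alternative algorithm of the same cost class, not claimed faster.

-- shared primitives (both Pythons contain these exact expressions)
-- d.get(k) on a dict passed as an assoc list: first match
def pvGet (p : List (String × String)) (k : String) : Option String :=
  (PySem.Dict.mk p).get? k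
-- `x or d` for a possibly-missing string x (falsy = missing or empty)
def pvStrOr (o : Option String) (d : String) : String :=
  match o with
  | none => d
  | some s => if s = "" then d else s
-- the literal priority table, applied to factor (shared table expression)
def pvPreferred (factor : String) : List String :=
  if factor = "simulated_vs_real_outcome" then ["winner_emergence", "competition_activation"]
  else if factor = "adoption_resistance" then ["competition_activation", "user_overlap"]
  else if factor = "pilot_success_to_scale" then ["winner_emergence", "competition_activation"]
  else []

-- ===== PORT A =====
-- inner loop: first point whose type equals t and whose step is present
def pvA_inner (bps : List (List (String × String))) (t : String) : Option String :=
  match bps with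
  | [] => none
  | p :: rest =>
    if pvGet p "type" == some t then
      match pvGet p "step" with
      | some s => some ("step-" ++ s)
      | none => pvA_inner rest t
    else pvA_inner rest t

-- outer loop over preferred_types
def pvA_outer (ts : List String) (bps : List (List (String × String))) : Option String :=
  match ts with
  | [] => none
  | t :: rest =>
    match pvA_inner bps t with
    | some r => some r
    | none => pvA_outer rest bps

-- third loop: first point with a step
def pvA_anyStep (bps : List (List (String × String))) : Option String :=
  match bps with
  | [] => none
  | p :: rest =>
    match pvGet p "step" with
    | some s => some ("step-" ++ s)
    | none => pvA_anyStep rest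

def choose_target_node_id_py (gap : List (String × String)) (branch_points : List (List (String × String))) (graph_nodes : List (List (String × String))) (fallback_index : Int) : String :=
  let factor := PySem.Str.strip (pvStrOr (pvGet gap "factor") "")
  let preferred_types := pvPreferred factor
  match pvA_outer preferred_types branch_points with
  | some r => r
  | none =>
    if factor == "simulated_vs_real_outcome" && !graph_nodes.isEmpty then
      pvStrOr (pvGet (PySem.List.pyGetD graph_nodes (-1) []) "id") "step-0"
    else
      match pvA_anyStep branch_points with
      | some r => r
      | none =>
        if !graph_nodes.isEmpty then
          match PySem.List.pyGet? graph_nodes (min fallback_index ((graph_nodes.length : Int) - 1)) with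
          | some node => pvStrOr (pvGet node "id") "step-0"
          | none => "step-0"  -- Python raises IndexError here; excluded by Pre_
        else "step-0"

-- ===== PORT B =====
-- rank = {t: i for i, t in enumerate(preferred)}
def pvRankTbl (ts : List String) : PySem.Dict String Int :=
  (PySem.List.enumerate ts).foldl (fun d it => d.insert it.2 it.1) PySem.Dict.empty

-- str(graph_nodes[index].get("id") or "step-0")  (the unified node fallback helper)
def pvNodeIdAt (gns : List (List (String × String))) (idx : Int) : String :=
  match PySem.List.pyGet? gns idx with
  | some node => pvStrOr (pvGet node "id") "step-0"
  | none => "step-0"  -- Python raises IndexError here; excluded by Pre_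

-- the single pass: minimal candidate under lexicographic (rank, position), and the
-- first step-bearing node id; returns (best, first_any)
def pvB_scan (tbl : PySem.Dict String Int) (bps : List (List (String × String))) (pos : Int) (best : Option (Int × Int × String)) (fa : Option String) : Option (Int × Int × String) × Option String :=
  match bps with
  | [] => (best, fa)
  | p :: rest =>
    match pvGet p "step" with
    | none => pvB_scan tbl rest (pos + 1) best fa
    | some s =>
      let node_id := "step-" ++ s
      let fa' := if fa.isNone then some node_id else fa
      let r? := match pvGet p "type" with
                | none => none
                | some t => tbl.get? t
      let best' :=
        match r? with
        | none => best
        | some r =>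
          match best with
          | none => some (r, pos, node_id)
          | some b => if r < b.1 ∨ (r = b.1 ∧ pos < b.2.1) then some (r, pos, node_id) else best
      pvB_scan tbl rest (pos + 1) best' fa'

def choose_target_node_id_py_alt (gap : List (String × String)) (branch_points : List (List (String × String))) (graph_nodes : List (List (String × String))) (fallback_index : Int) : String :=
  let factor := PySem.Str.strip (pvStrOr (pvGet gap "factor") "")
  let rank := pvRankTbl (pvPreferred factor)
  let st := pvB_scan rank branch_points 0 none none
  match st.1 with
  | some b => b.2.2
  | none =>
    if factor == "simulated_vs_real_outcome" && !graph_nodes.isEmpty then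
      pvNodeIdAt graph_nodes (-1)
    else
      match st.2 with
      | some r => r
      | none =>
        if !graph_nodes.isEmpty then
          pvNodeIdAt graph_nodes (min fallback_index ((graph_nodes.length : Int) - 1))
        else "step-0"

-- ===== PRECONDITION & SPEC =====
-- A (and B) raise IndexError only when the last fallback indexes graph_nodes with
-- fallback_index < -len(graph_nodes); that fallback is reached exactly when graph_nodes
-- is nonempty, the factor is not "simulated_vs_real_outcome" and no branch point has a
-- step. Pre_ excludes exactly those raising inputs.
def Pre_choose_target_node_id_py (gap : List (String × String)) (branch_points : List (List (String × String))) (graph_nodes : List (List (String × String))) (fallback_index : Int) : Prop :=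
  graph_nodes = [] ∨ -(graph_nodes.length : Int) ≤ fallback_index ∨
  PySem.Str.strip (pvStrOr (pvGet gap "factor") "") = "simulated_vs_real_outcome" ∨
  ∃ p ∈ branch_points, (pvGet p "step").isSome
instance (gap : List (String × String)) (branch_points : List (List (String × String))) (graph_nodes : List (List (String × String))) (fallback_index : Int) : Decidable (Pre_choose_target_node_id_py gap branch_points graph_nodes fallback_index) := by unfold Pre_choose_target_node_id_py; infer_instance

def pvWitness_choose_target_node_id_py : (List (String × String)) × (List (List (String × String))) × (List (List (String × String))) × Int :=
  ([("factor", "adoption_resistance")], [[("type", "user_overlap"), ("step", "3")]], [[("id", "n1")]], 0)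

def Spec_choose_target_node_id_py (gap : List (String × String)) (branch_points : List (List (String × String))) (graph_nodes : List (List (String × String))) (fallback_index : Int) (out : String) : Prop := out = choose_target_node_id_py_alt gap branch_points graph_nodes fallback_index
instance (gap : List (String × String)) (branch_points : List (List (String × String))) (graph_nodes : List (List (String × String))) (fallback_index : Int) (out : String) : Decidable (Spec_choose_target_node_id_py gap branch_points graph_nodes fallback_index out) := by unfold Spec_choose_target_node_id_py; infer_instance

-- ===== CLAIM (what is proved, stated in full; the proofs are below) =====
def Claim_equal_choose_target_node_id_py : Prop := ∀ (gap : List (String × String)) (branch_points : List (List (String × String))) (graph_nodes : List (List (String × String))) (fallback_index : Int), Dom_choose_target_node_id_py gap branch_points graph_nodes fallback_index → Pre_choose_target_node_id_py gap branch_points graph_nodes fallback_index → Spec_choose_target_node_id_py gap branch_points graph_nodes fallback_index (choose_target_node_id_py gap branch_points graph_nodes fallback_index)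

-- ===== LEMMAS AND PROOFS =====

-- the second component of the scan is the first step-bearing id (A's third loop)
theorem pvB_scan_snd (tbl : PySem.Dict String Int) (bps : List (List (String × String))) (pos : Int) (best : Option (Int × Int × String)) (fa : Option String) :
    (pvB_scan tbl bps pos best fa).2 = fa.or (pvA_anyStep bps) := by
  induction bps generalizing pos best fa with
  | nil => cases fa <;> rfl
  | cons p rest ih =>
    simp only [pvB_scan, pvA_anyStep]
    cases hstep : pvGet p "step" with
    | none => exact ih _ _ _
    | some s =>
      cases fa with
      | none => simp [ih]
      | some x => simp [ih]

-- with an empty rank table the scan never promotes a candidate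
theorem pvB_scan_empty (bps : List (List (String × String))) (pos : Int) (fa : Option String) :
    (pvB_scan PySem.Dict.empty bps pos none fa).1 = none := by
  induction bps generalizing pos fa with
  | nil => rfl
  | cons p rest ih =>
    simp only [pvB_scan]
    cases hstep : pvGet p "step" with
    | none => exact ih _ _
    | some s =>
      cases hty : pvGet p "type" with
      | none => exact ih _ _
      | some t => simp [PySem.Dict.get?_empty, ih]

-- A's nested-loop answer as a function of the scan accumulator (proof helper)
def pvResolve (t0 t1 : String) (bps : List (List (String × String))) (best : Option (Int × Int × String)) : Option String :=
  match best with
  | some (r, _, id) => if r = 0 then some id else (pvA_inner bps t0).or (some id)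
  | none => (pvA_inner bps t0).or (pvA_inner bps t1)

-- the key lemma: for a two-element rank table {t0 ↦ 0, t1 ↦ 1} (t0 ≠ t1), the minimal
-- candidate of the scan resolves exactly as A's nested preferred-type loops.
theorem pvB_scan_fst (t0 t1 : String) (_h01 : t0 ≠ t1)
    (tbl : PySem.Dict String Int)
    (htbl : ∀ t, tbl.get? t = if t = t0 then some 0 else if t = t1 then some 1 else none)
    (bps : List (List (String × String))) (pos : Int) (best : Option (Int × Int × String)) (fa : Option String)
    (hbest : ∀ r q id, best = some (r, q, id) → q < pos ∧ (r = 0 ∨ r = 1)) :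
    ((pvB_scan tbl bps pos best fa).1).map (·.2.2) = pvResolve t0 t1 bps best := by
  induction bps generalizing pos best fa with
  | nil =>
    match best, hbest with
    | none, _ => rfl
    | some (r, q, id), hb =>
      rcases (hb r q id rfl).2 with hr | hr <;> subst hr <;>
        simp [pvB_scan, pvA_inner, pvResolve]
  | cons p rest ih =>
    have hmono : ∀ r q id, best = some (r, q, id) → q < pos + 1 ∧ (r = 0 ∨ r = 1) :=
      fun r q id hb => ⟨by have := (hbest r q id hb).1; omega, (hbest r q id hb).2⟩
    simp only [pvB_scan]
    cases hstep : pvGet p "step" with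
    | none =>
      have hi : ∀ t, pvA_inner (p :: rest) t = pvA_inner rest t := by
        intro t; simp only [pvA_inner]
        by_cases ht : pvGet p "type" == some t <;> simp [ht, hstep]
      rw [ih _ best fa hmono]
      match best with
      | none => simp [pvResolve, hi]
      | some (r, q, id) => simp [pvResolve, hi]
    | some s =>
      cases hty : pvGet p "type" with
      | none =>
        have hi : ∀ t, pvA_inner (p :: rest) t = pvA_inner rest t := by
          intro t; simp [pvA_inner, hty]
        rw [ih _ best _ hmono]
        match best with
        | none => simp [pvResolve, hi]
        | some (r, q, id) => simp [pvResolve, hi]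
      | some ty =>
        simp only [htbl ty]
        by_cases h0 : ty = t0
        · -- rank 0 candidate: pvA_inner t0 hits p
          have hi0 : pvA_inner (p :: rest) t0 = some ("step-" ++ s) := by
            simp [pvA_inner, hty, h0, hstep]
          rw [if_pos h0]
          match best, hbest with
          | none, _ =>
            simp only []
            rw [ih _ (some (0, pos, "step-" ++ s)) _ (fun r' q' id' hb' => by
              simp only [Option.some.injEq, Prod.mk.injEq] at hb'
              exact ⟨by omega, Or.inl hb'.1.symm⟩)]
            simp [pvResolve, hi0]
          | some (r, q, id), hb =>
            have hq1 : q < pos := (hb r q id rfl).1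
            rcases (hb r q id rfl).2 with hr | hr
            · subst hr
              simp only []
              set fa2 : Option String := if fa.isNone = true then some ("step-" ++ s) else fa with hfa2
              split_ifs with hc
              · exfalso; omega
              · rw [ih _ (some (0, q, id)) _ (fun r' q' id' hb' => by
                  simp only [Option.some.injEq, Prod.mk.injEq] at hb'
                  exact ⟨by omega, Or.inl hb'.1.symm⟩)]
                simp [pvResolve]
            · subst hr
              simp only []
              set fa2 : Option String := if fa.isNone = true then some ("step-" ++ s) else fa with hfa2
              split_ifs with hc
              · rw [ih _ (some (0, pos, "step-" ++ s)) _ (fun r' q' id' hb' => by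
                  simp only [Option.some.injEq, Prod.mk.injEq] at hb'
                  exact ⟨by omega, Or.inl hb'.1.symm⟩)]
                simp [pvResolve, hi0]
              · exfalso; omega
        · -- ty ≠ t0: pvA_inner t0 skips p
          have hi0 : pvA_inner (p :: rest) t0 = pvA_inner rest t0 := by
            have hne : (pvGet p "type" == some t0) = false := by simp [hty, h0]
            simp [pvA_inner, hne]
          rw [if_neg h0]
          by_cases h1 : ty = t1
          · -- rank 1 candidate: pvA_inner t1 hits p
            have hi1 : pvA_inner (p :: rest) t1 = some ("step-" ++ s) := by
              simp [pvA_inner, hty, h1, hstep]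
            rw [if_pos h1]
            match best, hbest with
            | none, _ =>
              simp only []
              rw [ih _ (some (1, pos, "step-" ++ s)) _ (fun r' q' id' hb' => by
                simp only [Option.some.injEq, Prod.mk.injEq] at hb'
                exact ⟨by omega, Or.inr hb'.1.symm⟩)]
              simp [pvResolve, hi0, hi1]
            | some (r, q, id), hb =>
              have hq1 : q < pos := (hb r q id rfl).1
              rcases (hb r q id rfl).2 with hr | hr
              · subst hr
                simp only []
                set fa2 : Option String := if fa.isNone = true then some ("step-" ++ s) else fa with hfa2
                split_ifs with hc
                · exfalso; omega
                · rw [ih _ (some (0, q, id)) _ (fun r' q' id' hb' => by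
                    simp only [Option.some.injEq, Prod.mk.injEq] at hb'
                    exact ⟨by omega, Or.inl hb'.1.symm⟩)]
                  simp [pvResolve]
              · subst hr
                simp only []
                set fa2 : Option String := if fa.isNone = true then some ("step-" ++ s) else fa with hfa2
                split_ifs with hc
                · exfalso; omega
                · rw [ih _ (some (1, q, id)) _ (fun r' q' id' hb' => by
                    simp only [Option.some.injEq, Prod.mk.injEq] at hb'
                    exact ⟨by omega, Or.inr hb'.1.symm⟩)]
                  simp [pvResolve, hi0]
          · -- rank none: both inner loops skip p
            have hi1 : pvA_inner (p :: rest) t1 = pvA_inner rest t1 := by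
              have hne : (pvGet p "type" == some t1) = false := by simp [hty, h1]
              simp [pvA_inner, hne]
            rw [if_neg h1]
            rw [ih _ best _ hmono]
            match best with
            | none => simp [pvResolve, hi0, hi1]
            | some (r, q, id) => simp [pvResolve, hi0]

-- A's outer loop over a two-element preferred list is the or-chain of the inner loops
theorem pvA_outer_pair (t0 t1 : String) (bps : List (List (String × String))) :
    pvA_outer [t0, t1] bps = (pvA_inner bps t0).or (pvA_inner bps t1) := by
  simp only [pvA_outer]
  cases pvA_inner bps t0 <;> cases pvA_inner bps t1 <;> rfl

-- the rank table of a two-element preferred list, as a lookup function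
theorem pvRankTbl_pair (t0 t1 : String) (h01 : t0 ≠ t1) (t : String) :
    (pvRankTbl [t0, t1]).get? t = if t = t0 then some 0 else if t = t1 then some 1 else none := by
  show ((PySem.Dict.empty.insert t0 0).insert t1 1).get? t = _
  rw [PySem.Dict.get?_insert, PySem.Dict.get?_insert, PySem.Dict.get?_empty]
  by_cases h0 : t = t0 <;> by_cases h1 : t = t1 <;> simp_all

-- B's scan fully resolved against A's loops, for a concrete nonempty preferred pair
theorem pvB_resolve (t0 t1 : String) (h01 : t0 ≠ t1) (bps : List (List (String × String))) :
    ((pvB_scan (pvRankTbl [t0, t1]) bps 0 none none).1).map (·.2.2) = pvA_outer [t0, t1] bps := by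
  rw [pvB_scan_fst t0 t1 h01 _ (pvRankTbl_pair t0 t1 h01) bps 0 none none (by intro r q id h; cases h)]
  rw [pvA_outer_pair t0 t1 bps]; rfl

-- the -1 node fallback agrees with A's pyGetD form on a nonempty list
theorem pvNodeIdAt_neg_one (gns : List (List (String × String))) (h : gns ≠ []) :
    pvNodeIdAt gns (-1) = pvStrOr (pvGet (PySem.List.pyGetD gns (-1) []) "id") "step-0" := by
  simp [pvNodeIdAt, PySem.List.pyGet?_neg_one, PySem.List.pyGetD_neg_one gns [] h,
    List.getLast?_eq_getLast_of_ne_nil h]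

-- the fallback chains of the two ports agree
theorem pv_tail_eq (factor : String) (bps : List (List (String × String))) (gns : List (List (String × String))) (fi : Int) :
    (if factor == "simulated_vs_real_outcome" && !gns.isEmpty then
      pvNodeIdAt gns (-1)
    else
      match pvA_anyStep bps with
      | some r => r
      | none =>
        if !gns.isEmpty then
          pvNodeIdAt gns (min fi ((gns.length : Int) - 1))
        else "step-0") =
    (if factor == "simulated_vs_real_outcome" && !gns.isEmpty then
      pvStrOr (pvGet (PySem.List.pyGetD gns (-1) []) "id") "step-0"
    else
      match pvA_anyStep bps with
      | some r => r
      | none =>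
        if !gns.isEmpty then
          match PySem.List.pyGet? gns (min fi ((gns.length : Int) - 1)) with
          | some node => pvStrOr (pvGet node "id") "step-0"
          | none => "step-0"
        else "step-0") := by
  by_cases hsim : (factor == "simulated_vs_real_outcome" && !gns.isEmpty) = true
  · rw [if_pos hsim, if_pos hsim]
    exact pvNodeIdAt_neg_one gns (by cases gns <;> simp_all)
  · rw [if_neg hsim, if_neg hsim]
    cases pvA_anyStep bps with
    | some r => rfl
    | none => rfl

-- ===== VERDICT (by name: the statement is the Claim_ definition above) =====
theorem choose_target_node_id_py_spec : Claim_equal_choose_target_node_id_py := by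
  intro gap bps gns fi _ _
  unfold Spec_choose_target_node_id_py
  show choose_target_node_id_py gap bps gns fi = choose_target_node_id_py_alt gap bps gns fi
  simp only [choose_target_node_id_py, choose_target_node_id_py_alt]
  set factor := PySem.Str.strip (pvStrOr (pvGet gap "factor") "") with hfac
  have hres : ((pvB_scan (pvRankTbl (pvPreferred factor)) bps 0 none none).1).map (·.2.2)
      = pvA_outer (pvPreferred factor) bps := by
    unfold pvPreferred
    by_cases h1 : factor = "simulated_vs_real_outcome"
    · simp only [h1, reduceIte]
      rw [pvB_resolve _ _ (by decide) bps]
    · rw [if_neg h1]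
      by_cases h2 : factor = "adoption_resistance"
      · simp only [h2, reduceIte]
        rw [pvB_resolve _ _ (by decide) bps]
      · rw [if_neg h2]
        by_cases h3 : factor = "pilot_success_to_scale"
        · simp only [h3, reduceIte]
          rw [pvB_resolve _ _ (by decide) bps]
        · rw [if_neg h3]
          rw [show pvRankTbl [] = PySem.Dict.empty from rfl, pvB_scan_empty bps 0 none]
          simp [pvA_outer]
  have hsnd : (pvB_scan (pvRankTbl (pvPreferred factor)) bps 0 none none).2 = pvA_anyStep bps := by
    rw [pvB_scan_snd]; simp
  cases hst : (pvB_scan (pvRankTbl (pvPreferred factor)) bps 0 none none).1 with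
  | some b =>
    have h2 : pvA_outer (pvPreferred factor) bps = some b.2.2 := by rw [← hres, hst]; rfl
    rw [h2]
  | none =>
    have h2 : pvA_outer (pvPreferred factor) bps = none := by rw [← hres, hst]; rfl
    rw [h2, hsnd]
    exact (pv_tail_eq factor bps gns fi).symm
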